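-- pv_equiv track=rewrite | github.com/KaiStarkk/scope-spider | backend/domain/s0_stats.py | _expand_stages
-- ===== SOURCE A (Python) =====
-- from typing import (
--     Any,
--     Iterable,
--     List,
--     Optional,
--     Tuple,
--     Type,
--     Set,
--     Union,
--     get_args,
--     get_origin,
--     Literal,
-- )
--
-- STAGE_NAMES = ("s2", "s3", "s4", "s5", "s6")
--
-- STAGE_DEPENDENCIES = {
--     "s2": ("s2", "s3", "s4", "s5"),
--     "s3": ("s3", "s4", "s5"),
--     "s4": ("s4", "s5"),
--     "s5": ("s5",),
--     "s6": ("s6",),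
-- }
--
-- def _expand_stages(stages: Iterable[str]) -> List[str]:
--     ordered: List[str] = []
--     seen: Set[str] = set()
--     for stage in stages:
--         key = stage.lower()
--         if key not in STAGE_DEPENDENCIES:
--             raise ValueError(
--                 f"Unsupported stage {stage!r}; expected one of {', '.join(STAGE_NAMES)}"
--             )
--         for dependent in STAGE_DEPENDENCIES[key]:
--             if dependent in seen:
--                 continue
--             ordered.append(dependent)
--             seen.add(dependent)
--     return ordered
-- ===== SOURCE B (Python) =====
-- STAGE_NAMES = ("s2", "s3", "s4", "s5", "s6")
--
-- # The dependency table is an interval structure: stage sK (K in 2..5) depends on the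
-- # suffix sK..s5, and s6 only on itself.  So instead of a table + seen-set, track the
-- # lowest suffix index already emitted and append only the newly uncovered interval.
-- ORDER = ("s2", "s3", "s4", "s5")
--
-- def _expand_stages(stages):
--     out = []
--     m = len(ORDER)        # suffix ORDER[m:] has been emitted so far
--     seen6 = False
--     for stage in stages:
--         key = stage.lower()
--         if key == "s6":
--             if not seen6:
--                 out.append("s6")
--                 seen6 = True
--             continue
--         if key not in ORDER:
--             raise ValueError(
--                 f"Unsupported stage {stage!r}; expected one of {', '.join(STAGE_NAMES)}"
--             )
--         k = ORDER.index(key)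
--         if k < m:
--             out.extend(ORDER[k:m])
--             m = k
--     return out
-- ===== Notes on version B (the rewrite author's own statement) =====
-- stated objective: alternative
-- what changed: B drops the dependency table and seen-set entirely: it exploits that each stage's dependencies are a suffix interval of (s2,s3,s4,s5) (s6 standalone), so it tracks only the lowest emitted suffix index m plus an s6 flag and appends the newly uncovered slice ORDER[k:m] per stage.
import Mathlib
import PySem

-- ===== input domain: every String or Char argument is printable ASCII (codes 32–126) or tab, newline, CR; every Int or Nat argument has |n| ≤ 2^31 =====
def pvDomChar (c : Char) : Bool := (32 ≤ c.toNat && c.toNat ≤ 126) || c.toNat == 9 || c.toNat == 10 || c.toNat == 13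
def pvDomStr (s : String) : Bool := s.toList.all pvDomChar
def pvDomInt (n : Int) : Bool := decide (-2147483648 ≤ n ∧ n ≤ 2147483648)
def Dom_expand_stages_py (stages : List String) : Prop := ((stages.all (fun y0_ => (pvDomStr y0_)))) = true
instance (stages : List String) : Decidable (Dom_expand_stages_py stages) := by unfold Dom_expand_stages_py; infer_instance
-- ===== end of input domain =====

-- B replaces A's dependency-table + seen-set scan with an interval scheme: each stage's dependencies form a suffix of ORDER = (s2,s3,s4,s5) (s6 standalone), so B tracks only the lowest emitted suffix index m plus an s6 flag and appends the newly uncovered slice ORDER[k:m] (objective: alternative).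


-- ===== PORT A =====
-- module constant STAGE_DEPENDENCIES
def STAGE_DEPENDENCIES_py : PySem.Dict String (List String) :=
  PySem.Dict.ofList
    [("s2", ["s2", "s3", "s4", "s5"]),
     ("s3", ["s3", "s4", "s5"]),
     ("s4", ["s4", "s5"]),
     ("s5", ["s5"]),
     ("s6", ["s6"])]

def expand_stages_py (stages : List String) : List String :=
  (stages.foldl
    (fun (st : List String × PySem.Set String) stage =>
      match STAGE_DEPENDENCIES_py.get? (PySem.Str.lower stage) with
      | none => st   -- Python raises ValueError here; excluded by Pre_expand_stages_py
      | some deps =>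
        deps.foldl
          (fun st dependent =>
            if PySem.Set.contains st.2 dependent then st
            else (st.1 ++ [dependent], PySem.Set.add st.2 dependent))
          st)
    ([], PySem.Set.empty)).1

-- ===== PORT B =====
-- module constant ORDER
def ORDER_py : List String := ["s2", "s3", "s4", "s5"]

def expand_stages_py_alt (stages : List String) : List String :=
  (stages.foldl
    (fun (st : List String × Int × Bool) stage =>
      let key := PySem.Str.lower stage
      if key == "s6" then
        if st.2.2 then st else (st.1 ++ ["s6"], st.2.1, true)
      else
        match PySem.List.index? ORDER_py key with
        | none => st   -- Python raises ValueError here; excluded by Pre_expand_stages_py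
        | some k =>
          if (k : Int) < st.2.1 then
            (st.1 ++ PySem.List.slice ORDER_py (some (k : Int)) (some st.2.1), (k : Int), st.2.2)
          else st)
    ([], (4 : Int), false)).1

-- ===== PRECONDITION & SPEC =====
-- A (and B alike) raises ValueError on any stage whose lowercasing is not a key of STAGE_DEPENDENCIES; Pre_ admits the rest.
def Pre_expand_stages_py (stages : List String) : Prop :=
  ∀ s ∈ stages, STAGE_DEPENDENCIES_py.contains (PySem.Str.lower s) = true
instance (stages : List String) : Decidable (Pre_expand_stages_py stages) := by unfold Pre_expand_stages_py; infer_instance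
def pvWitness_expand_stages_py : List String := ["S3", "s6", "s2", "s3"]

def Spec_expand_stages_py (stages : List String) (out : List String) : Prop := out = expand_stages_py_alt stages
instance (stages : List String) (out : List String) : Decidable (Spec_expand_stages_py stages out) := by unfold Spec_expand_stages_py; infer_instance

-- ===== CLAIM (what is proved, stated in full; the proofs are below) =====
def Claim_equal_expand_stages_py : Prop := ∀ (stages : List String), Dom_expand_stages_py stages → Pre_expand_stages_py stages → Spec_expand_stages_py stages (expand_stages_py stages)

-- ===== LEMMAS AND PROOFS =====

-- A's and B's loop bodies as named step functions (definitionally the ports' lambdas)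
def pvStepA (st : List String × PySem.Set String) (stage : String) : List String × PySem.Set String :=
  match STAGE_DEPENDENCIES_py.get? (PySem.Str.lower stage) with
  | none => st
  | some deps =>
    deps.foldl
      (fun st dependent =>
        if PySem.Set.contains st.2 dependent then st
        else (st.1 ++ [dependent], PySem.Set.add st.2 dependent))
      st

def pvStepB (st : List String × Int × Bool) (stage : String) : List String × Int × Bool :=
  let key := PySem.Str.lower stage
  if key == "s6" then
    if st.2.2 then st else (st.1 ++ ["s6"], st.2.1, true)
  else
    match PySem.List.index? ORDER_py key with
    | none => st
    | some k =>
      if (k : Int) < st.2.1 then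
        (st.1 ++ PySem.List.slice ORDER_py (some (k : Int)) (some st.2.1), (k : Int), st.2.2)
      else st

-- invariant: A's emitted list o is mirrored by B's compressed state (m = lowest emitted ORDER index, b = s6 emitted)
def pvInv (o : List String) (m : Int) (b : Bool) : Prop :=
  (("s2" ∈ o) ↔ m ≤ 0) ∧ (("s3" ∈ o) ↔ m ≤ 1) ∧ (("s4" ∈ o) ↔ m ≤ 2) ∧
  (("s5" ∈ o) ↔ m ≤ 3) ∧ (("s6" ∈ o) ↔ b = true) ∧ 0 ≤ m ∧ m ≤ 4

lemma pv_dict_eq : STAGE_DEPENDENCIES_py = PySem.Dict.mk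
    [("s2", ["s2", "s3", "s4", "s5"]), ("s3", ["s3", "s4", "s5"]), ("s4", ["s4", "s5"]), ("s5", ["s5"]), ("s6", ["s6"])] := by rfl

lemma pv_contains_iff (x : String) :
    STAGE_DEPENDENCIES_py.contains x = true ↔ (x = "s2" ∨ x = "s3" ∨ x = "s4" ∨ x = "s5" ∨ x = "s6") := by
  rw [pv_dict_eq, PySem.Dict.contains_eq_decide_mem_keys]
  simp [PySem.Dict.keys_mk]

lemma pv_step (s : String) (o : List String) (m : Int) (b : Bool) (hInv : pvInv o m b) :
    ∃ o' m' b', pvStepA (o, o) s = (o', o') ∧ pvStepB (o, m, b) s = (o', m', b') ∧ pvInv o' m' b' := by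
  obtain ⟨i2, i3, i4, i5, i6, hm0, hm4⟩ := hInv
  by_cases hc : STAGE_DEPENDENCIES_py.contains (PySem.Str.lower s) = true
  · rcases (pv_contains_iff _).mp hc with hk | hk | hk | hk | hk
    · -- key "s2" (index 0)
      have hg : STAGE_DEPENDENCIES_py.get? (PySem.Str.lower s) = some ["s2", "s3", "s4", "s5"] := by rw [hk]; decide
      have hidx : List.idxOf? "s2" ORDER_py = some 0 := by decide
      interval_cases m
      · -- m = 0
        refine ⟨o, 0, b, ?_, ?_, ⟨i2, i3, i4, i5, i6, hm0, hm4⟩⟩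
        · simp [pvStepA, hg, PySem.Set.add, i2, i3, i4, i5]
        · simp [pvStepB, hk, hidx]
      · -- m = 1
        refine ⟨o ++ ["s2"], 0, b, ?_, ?_, ?_⟩
        · simp [pvStepA, hg, PySem.Set.add, i2, i3, i4, i5]
        · simp [pvStepB, hk, hidx, show PySem.List.slice ORDER_py (some (0 : Int)) (some (1 : Int)) = ["s2"] from by decide]
        · simp [pvInv, List.mem_append, i2, i3, i4, i5, i6]
      · -- m = 2
        refine ⟨o ++ ["s2", "s3"], 0, b, ?_, ?_, ?_⟩
        · simp [pvStepA, hg, PySem.Set.add, i2, i3, i4, i5]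
        · simp [pvStepB, hk, hidx, show PySem.List.slice ORDER_py (some (0 : Int)) (some (2 : Int)) = ["s2", "s3"] from by decide]
        · simp [pvInv, List.mem_append, i2, i3, i4, i5, i6]
      · -- m = 3
        refine ⟨o ++ ["s2", "s3", "s4"], 0, b, ?_, ?_, ?_⟩
        · simp [pvStepA, hg, PySem.Set.add, i2, i3, i4, i5]
        · simp [pvStepB, hk, hidx, show PySem.List.slice ORDER_py (some (0 : Int)) (some (3 : Int)) = ["s2", "s3", "s4"] from by decide]
        · simp [pvInv, List.mem_append, i2, i3, i4, i5, i6]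
      · -- m = 4
        refine ⟨o ++ ["s2", "s3", "s4", "s5"], 0, b, ?_, ?_, ?_⟩
        · simp [pvStepA, hg, PySem.Set.add, i2, i3, i4, i5]
        · simp [pvStepB, hk, hidx, show PySem.List.slice ORDER_py (some (0 : Int)) (some (4 : Int)) = ["s2", "s3", "s4", "s5"] from by decide]
        · simp [pvInv, List.mem_append, i2, i3, i4, i5, i6]
    · -- key "s3" (index 1)
      have hg : STAGE_DEPENDENCIES_py.get? (PySem.Str.lower s) = some ["s3", "s4", "s5"] := by rw [hk]; decide
      have hidx : List.idxOf? "s3" ORDER_py = some 1 := by decide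
      interval_cases m
      · -- m = 0
        refine ⟨o, 0, b, ?_, ?_, ⟨i2, i3, i4, i5, i6, hm0, hm4⟩⟩
        · simp [pvStepA, hg, PySem.Set.add, i3, i4, i5]
        · simp [pvStepB, hk, hidx]
      · -- m = 1
        refine ⟨o, 1, b, ?_, ?_, ⟨i2, i3, i4, i5, i6, hm0, hm4⟩⟩
        · simp [pvStepA, hg, PySem.Set.add, i3, i4, i5]
        · simp [pvStepB, hk, hidx]
      · -- m = 2
        refine ⟨o ++ ["s3"], 1, b, ?_, ?_, ?_⟩
        · simp [pvStepA, hg, PySem.Set.add, i3, i4, i5]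
        · simp [pvStepB, hk, hidx, show PySem.List.slice ORDER_py (some (1 : Int)) (some (2 : Int)) = ["s3"] from by decide]
        · simp [pvInv, List.mem_append, i2, i3, i4, i5, i6]
      · -- m = 3
        refine ⟨o ++ ["s3", "s4"], 1, b, ?_, ?_, ?_⟩
        · simp [pvStepA, hg, PySem.Set.add, i3, i4, i5]
        · simp [pvStepB, hk, hidx, show PySem.List.slice ORDER_py (some (1 : Int)) (some (3 : Int)) = ["s3", "s4"] from by decide]
        · simp [pvInv, List.mem_append, i2, i3, i4, i5, i6]
      · -- m = 4
        refine ⟨o ++ ["s3", "s4", "s5"], 1, b, ?_, ?_, ?_⟩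
        · simp [pvStepA, hg, PySem.Set.add, i3, i4, i5]
        · simp [pvStepB, hk, hidx, show PySem.List.slice ORDER_py (some (1 : Int)) (some (4 : Int)) = ["s3", "s4", "s5"] from by decide]
        · simp [pvInv, List.mem_append, i2, i3, i4, i5, i6]
    · -- key "s4" (index 2)
      have hg : STAGE_DEPENDENCIES_py.get? (PySem.Str.lower s) = some ["s4", "s5"] := by rw [hk]; decide
      have hidx : List.idxOf? "s4" ORDER_py = some 2 := by decide
      interval_cases m
      · -- m = 0
        refine ⟨o, 0, b, ?_, ?_, ⟨i2, i3, i4, i5, i6, hm0, hm4⟩⟩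
        · simp [pvStepA, hg, PySem.Set.add, i4, i5]
        · simp [pvStepB, hk, hidx]
      · -- m = 1
        refine ⟨o, 1, b, ?_, ?_, ⟨i2, i3, i4, i5, i6, hm0, hm4⟩⟩
        · simp [pvStepA, hg, PySem.Set.add, i4, i5]
        · simp [pvStepB, hk, hidx]
      · -- m = 2
        refine ⟨o, 2, b, ?_, ?_, ⟨i2, i3, i4, i5, i6, hm0, hm4⟩⟩
        · simp [pvStepA, hg, PySem.Set.add, i4, i5]
        · simp [pvStepB, hk, hidx]
      · -- m = 3
        refine ⟨o ++ ["s4"], 2, b, ?_, ?_, ?_⟩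
        · simp [pvStepA, hg, PySem.Set.add, i4, i5]
        · simp [pvStepB, hk, hidx, show PySem.List.slice ORDER_py (some (2 : Int)) (some (3 : Int)) = ["s4"] from by decide]
        · simp [pvInv, List.mem_append, i2, i3, i4, i5, i6]
      · -- m = 4
        refine ⟨o ++ ["s4", "s5"], 2, b, ?_, ?_, ?_⟩
        · simp [pvStepA, hg, PySem.Set.add, i4, i5]
        · simp [pvStepB, hk, hidx, show PySem.List.slice ORDER_py (some (2 : Int)) (some (4 : Int)) = ["s4", "s5"] from by decide]
        · simp [pvInv, List.mem_append, i2, i3, i4, i5, i6]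
    · -- key "s5" (index 3)
      have hg : STAGE_DEPENDENCIES_py.get? (PySem.Str.lower s) = some ["s5"] := by rw [hk]; decide
      have hidx : List.idxOf? "s5" ORDER_py = some 3 := by decide
      interval_cases m
      · -- m = 0
        refine ⟨o, 0, b, ?_, ?_, ⟨i2, i3, i4, i5, i6, hm0, hm4⟩⟩
        · simp [pvStepA, hg, PySem.Set.add, i5]
        · simp [pvStepB, hk, hidx]
      · -- m = 1
        refine ⟨o, 1, b, ?_, ?_, ⟨i2, i3, i4, i5, i6, hm0, hm4⟩⟩
        · simp [pvStepA, hg, PySem.Set.add, i5]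
        · simp [pvStepB, hk, hidx]
      · -- m = 2
        refine ⟨o, 2, b, ?_, ?_, ⟨i2, i3, i4, i5, i6, hm0, hm4⟩⟩
        · simp [pvStepA, hg, PySem.Set.add, i5]
        · simp [pvStepB, hk, hidx]
      · -- m = 3
        refine ⟨o, 3, b, ?_, ?_, ⟨i2, i3, i4, i5, i6, hm0, hm4⟩⟩
        · simp [pvStepA, hg, PySem.Set.add, i5]
        · simp [pvStepB, hk, hidx]
      · -- m = 4
        refine ⟨o ++ ["s5"], 3, b, ?_, ?_, ?_⟩
        · simp [pvStepA, hg, PySem.Set.add, i5]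
        · simp [pvStepB, hk, hidx, show PySem.List.slice ORDER_py (some (3 : Int)) (some (4 : Int)) = ["s5"] from by decide]
        · simp [pvInv, List.mem_append, i2, i3, i4, i5, i6]
    · -- key "s6"
      have hg : STAGE_DEPENDENCIES_py.get? (PySem.Str.lower s) = some ["s6"] := by rw [hk]; decide
      cases b with
      | true =>
        refine ⟨o, m, true, ?_, ?_, ⟨i2, i3, i4, i5, i6, hm0, hm4⟩⟩
        · simp [pvStepA, hg, PySem.Set.add, i6]
        · simp [pvStepB, hk]
      | false =>
        refine ⟨o ++ ["s6"], m, true, ?_, ?_, ?_⟩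
        · simp [pvStepA, hg, PySem.Set.add, i6]
        · simp [pvStepB, hk]
        · simp [pvInv, List.mem_append, i2, i3, i4, i5, i6, hm0, hm4]
  · -- invalid key: both steps are the identity
    refine ⟨o, m, b, ?_, ?_, ⟨i2, i3, i4, i5, i6, hm0, hm4⟩⟩
    · have hg : STAGE_DEPENDENCIES_py.get? (PySem.Str.lower s) = none := by
        rw [PySem.Dict.get?_eq_none_iff_contains]
        simpa using hc
      simp [pvStepA, hg]
    · have h6 : PySem.Str.lower s ≠ "s6" := fun h => hc ((pv_contains_iff _).mpr (Or.inr (Or.inr (Or.inr (Or.inr h)))))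
      have hidx : List.idxOf? (PySem.Str.lower s) ORDER_py = none := by
        rw [← PySem.List.index?_eq_idxOf?, PySem.List.index?_eq_none_iff]
        intro hmem
        refine hc ((pv_contains_iff _).mpr ?_)
        simp only [ORDER_py, List.mem_cons, List.not_mem_nil, or_false] at hmem
        rcases hmem with h|h|h|h
        · exact Or.inl h
        · exact Or.inr (Or.inl h)
        · exact Or.inr (Or.inr (Or.inl h))
        · exact Or.inr (Or.inr (Or.inr (Or.inl h)))
      simp [pvStepB, hidx, h6]


lemma pv_main (stages : List String) : ∀ (o : List String) (m : Int) (b : Bool),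
    pvInv o m b →
    (stages.foldl pvStepA (o, o)).1 = (stages.foldl pvStepB (o, m, b)).1 := by
  induction stages with
  | nil => intro o m b _; rfl
  | cons s rest ih =>
    intro o m b hInv
    obtain ⟨o', m', b', hA, hB, hInv'⟩ := pv_step s o m b hInv
    rw [List.foldl_cons, List.foldl_cons, hA, hB]
    exact ih o' m' b' hInv'

-- ===== VERDICT (by name: the statement is the Claim_ definition above) =====
theorem expand_stages_py_spec : Claim_equal_expand_stages_py := by
  intro stages _ _
  unfold Spec_expand_stages_py expand_stages_py expand_stages_py_alt
  exact pv_main stages [] 4 false (by simp [pvInv])
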